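-- pv_equiv track=rewrite | github.com/E137299/NamePicker | WordleHelper.py | sorted_dictionary
-- ===== SOURCE A (Python) =====
-- def sorted_dictionary(dic):
--     # list containing tuples. (key, value
--     sorted_list = sorted(dic.items(), key=lambda x: x[1])
--     rank_value = {}
--     for i in range(len(sorted_list)):
--         for letter in dic:
--             if dic[letter] == sorted_list[i][1]:
--                 rank_value[letter] = i
--     return rank_value
-- ===== SOURCE B (Python) =====
-- def sorted_dictionary(dic):
--     # Sort items by value once; a single pass records the last sorted index of
--     # each value; each key then gets its value's last index.  O(n log n).
--     items = sorted(dic.items(), key=lambda x: x[1])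
--     last = {}
--     for i, (_, v) in enumerate(items):
--         last[v] = i
--     return {k: last[v] for k, v in items}
-- ===== Notes on version B (the rewrite author's own statement) =====
-- stated objective: faster
-- what changed: A rescans every dict key for each sorted position (nested loops); B sorts once, records each value's last sorted index in a single enumerate pass over the sorted items, and then assigns each key its value's index by one dict lookup per key.
import Mathlib
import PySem

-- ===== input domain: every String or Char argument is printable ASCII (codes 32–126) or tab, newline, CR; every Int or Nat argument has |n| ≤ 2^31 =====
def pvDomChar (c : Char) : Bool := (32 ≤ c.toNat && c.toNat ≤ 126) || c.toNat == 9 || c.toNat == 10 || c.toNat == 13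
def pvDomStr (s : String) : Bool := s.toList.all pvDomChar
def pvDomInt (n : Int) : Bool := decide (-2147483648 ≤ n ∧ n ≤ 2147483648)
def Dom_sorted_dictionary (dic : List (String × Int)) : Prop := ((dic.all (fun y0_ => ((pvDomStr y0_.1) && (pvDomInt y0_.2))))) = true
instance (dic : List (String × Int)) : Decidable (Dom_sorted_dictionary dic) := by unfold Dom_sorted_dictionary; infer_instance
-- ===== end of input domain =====

-- B replaces A's nested scan (for every sorted position, rescan all keys) by one sort,
-- one pass recording each value's last sorted index, and one lookup pass per key.

-- ===== PORT A =====
-- literal port of A; dic is the Python dict (duplicate keys resolved by dict semantics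
-- via PySem.Dict.ofList). dic[letter] is a guaranteed hit (letter iterates dic's keys),
-- ported as getD with an unused default.
def sorted_dictionary (dic : List (String × Int)) : List (String × Int) :=
  let d := PySem.Dict.ofList dic
  let sorted_list := PySem.List.sorted d.items (fun x => x.2)
  let rank_value : PySem.Dict String Int :=
    (PySem.List.pyRange 0 (PySem.List.len sorted_list)).foldl
      (fun r i =>
        d.keys.foldl
          (fun r letter =>
            if d.getD letter 0 = (PySem.List.pyGetD sorted_list i ("", 0)).2
            then r.insert letter i else r)
          r)
      PySem.Dict.empty
  rank_value.items

-- ===== PORT B =====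
-- port of Source B: sort once, one enumerate pass building last[v] = last sorted index of v,
-- then the result dict comprehension {k: last[v] for k, v in items} (last[v] always hits:
-- v was inserted during the pass; ported as getD with an unused default).
def sorted_dictionary_alt (dic : List (String × Int)) : List (String × Int) :=
  let d := PySem.Dict.ofList dic
  let items := PySem.List.sorted d.items (fun x => x.2)
  let last : PySem.Dict Int Int :=
    (PySem.List.enumerate items).foldl (fun m p => m.insert p.2.2 p.1) PySem.Dict.empty
  let res : PySem.Dict String Int :=
    items.foldl (fun r kv => r.insert kv.1 (last.getD kv.2 0)) PySem.Dict.empty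
  res.items

-- ===== PRECONDITION & SPEC =====
def Spec_sorted_dictionary (dic : List (String × Int)) (out : List (String × Int)) : Prop := out = sorted_dictionary_alt dic
instance (dic : List (String × Int)) (out : List (String × Int)) : Decidable (Spec_sorted_dictionary dic out) := by unfold Spec_sorted_dictionary; infer_instance

-- ===== CLAIM (what is proved, stated in full; the proofs are below) =====
def Claim_equal_sorted_dictionary : Prop := ∀ (dic : List (String × Int)), Dom_sorted_dictionary dic → Spec_sorted_dictionary dic (sorted_dictionary dic)

-- ===== LEMMAS AND PROOFS =====

-- the last index (counting from n0) at which value v occurs in S, as the fold both sides reduce to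
def pvRank (S : List (String × Int)) (n0 : Int) (v : Int) (a0 : Int) : Int :=
  (PySem.List.enumerate S n0).foldl (fun a p => if p.2.2 = v then p.1 else a) a0

lemma pvRank_append (S T : List (String × Int)) (n0 v a0 : Int) :
    pvRank (S ++ T) n0 v a0 = pvRank T (n0 + S.length) v (pvRank S n0 v a0) := by
  simp [pvRank, PySem.List.enumerate_append, List.foldl_append]

lemma pvRank_of_not_mem (S : List (String × Int)) (n0 v a0 : Int)
    (h : ∀ kv ∈ S, kv.2 ≠ v) : pvRank S n0 v a0 = a0 := by
  induction S generalizing n0 a0 with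
  | nil => rfl
  | cons x S ih =>
      simp only [pvRank, PySem.List.enumerate_cons, List.foldl_cons] at *
      rw [if_neg (h x (by simp))]
      exact ih _ _ (fun kv hk => h kv (by simp [hk]))

lemma pvRank_of_all_eq (S : List (String × Int)) (n0 v a0 : Int)
    (hne : S ≠ []) (h : ∀ kv ∈ S, kv.2 = v) :
    pvRank S n0 v a0 = n0 + S.length - 1 := by
  induction S generalizing n0 a0 with
  | nil => exact absurd rfl hne
  | cons x S ih =>
      simp only [pvRank, PySem.List.enumerate_cons, List.foldl_cons]
      rw [if_pos (h x (by simp))]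
      rcases eq_or_ne S [] with rfl | hS
      · rw [PySem.List.enumerate_nil]
        norm_num
      · have := ih (n0 + 1) n0 hS (fun kv hk => h kv (by simp [hk]))
        simp only [pvRank] at this
        rw [this]
        simp only [List.length_cons]
        push_cast
        ring

-- B's `last` dict looks up to exactly pvRank
lemma getD_foldl_insert_snd (S : List (String × Int)) (n0 : Int) (m : PySem.Dict Int Int) (v : Int) :
    ((PySem.List.enumerate S n0).foldl (fun m p => m.insert p.2.2 p.1) m).getD v 0
      = pvRank S n0 v (m.getD v 0) := by
  induction S generalizing n0 m with
  | nil => rfl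
  | cons x S ih =>
      simp only [PySem.List.enumerate_cons, List.foldl_cons]
      rw [ih, PySem.Dict.getD_insert]
      simp only [pvRank, PySem.List.enumerate_cons, List.foldl_cons]
      by_cases h : x.2 = v
      · simp [h]
      · simp [h, Ne.symm h]

-- stability of PySem.List.sorted: filtering one key class commutes with sorting
lemma filter_insertBy_eq_of_key {α : Type} (key : α → Int) (x : α) (ys : List α)
    (hys : ys.Pairwise (fun a b => key a ≤ key b)) (hx : key x = v) :
    (PySem.List.insertBy (fun a b => decide (key a < key b)) x ys).filter (fun a => key a == v)
      = ys.filter (fun a => key a == v) ++ [x] := by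
  induction ys with
  | nil => simp [PySem.List.insertBy, hx]
  | cons y ys ih =>
      simp only [PySem.List.insertBy]
      by_cases hlt : key x < key y
      · simp only [hlt, decide_true, if_true]
        have hy : ¬ (key y = v) := by omega
        have hys' : ∀ a ∈ ys, ¬ (key a = v) := by
          intro a ha
          have := (List.pairwise_cons.mp hys).1 a ha
          omega
        have h1 : ys.filter (fun a => key a == v) = [] := by
          simp [List.filter_eq_nil_iff]
          intro a ha; exact hys' a ha
        simp [hy, h1, hx]
      · rw [if_neg (by simp [hlt])]
        rw [List.filter_cons, List.filter_cons]
        rw [ih (List.pairwise_cons.mp hys).2]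
        by_cases hy : key y = v <;> simp [hy]

lemma filter_sorted_eq {α : Type} (xs : List α) (key : α → Int) (v : Int) :
    (PySem.List.sorted xs key).filter (fun a => key a == v)
      = xs.filter (fun a => key a == v) := by
  induction xs using List.reverseRecOn with
  | nil => rfl
  | append_singleton xs x ih =>
      have h1 : PySem.List.sorted (xs ++ [x]) key
          = PySem.List.insertBy (fun a b => decide (key a < key b)) x (PySem.List.sorted xs key) := by
        rw [PySem.List.sorted_eq_foldl_insertBy, PySem.List.sorted_eq_foldl_insertBy, List.foldl_append]
        simp
      rw [h1, List.filter_append]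
      by_cases hx : key x = v
      · rw [filter_insertBy_eq_of_key key x _ (PySem.List.sorted_pairwise xs key) hx, ih]
        simp [hx]
      · have h2 : ∀ ys : List α, ys.Pairwise (fun a b => key a ≤ key b) →
            (PySem.List.insertBy (fun a b => decide (key a < key b)) x ys).filter (fun a => key a == v)
              = ys.filter (fun a => key a == v) := by
          intro ys hys
          induction ys with
          | nil => simp [PySem.List.insertBy, hx]
          | cons y ys ih2 =>
              simp only [PySem.List.insertBy]
              by_cases hlt : key x < key y
              · simp [hlt, List.filter_cons, hx]
              · rw [if_neg (by simp [hlt])]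
                rw [List.filter_cons, List.filter_cons, ih2 (List.pairwise_cons.mp hys).2]
        rw [h2 _ (PySem.List.sorted_pairwise xs key), ih]
        simp [hx]

-- overwrite loop: re-inserting an already-present tail of keys with a new constant value
lemma foldl_insert_overwrite (L : List String) (t : List (String × Int)) (j j' : Int)
    (hL : L.Nodup) (ht : ∀ p ∈ t, p.1 ∉ L) :
    L.foldl (fun r k => r.insert k j') (PySem.Dict.mk (t ++ L.map (fun k => (k, j))))
      = PySem.Dict.mk (t ++ L.map (fun k => (k, j'))) := by
  induction L generalizing t with
  | nil => rfl
  | cons k L ih =>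
      simp only [List.foldl_cons]
      have hc : (PySem.Dict.mk (t ++ (k :: L).map (fun k => (k, j)))).contains k = true := by
        rw [PySem.Dict.contains_iff_mem_keys]
        simp [PySem.Dict.keys]
      have hstep : (PySem.Dict.mk (t ++ (k :: L).map (fun k => (k, j)))).insert k j'
          = PySem.Dict.mk ((t ++ [(k, j')]) ++ L.map (fun k => (k, j))) := by
        apply PySem.Dict.ext
        rw [PySem.Dict.items_insert_of_contains _ _ hc]
        simp only [List.map_cons, List.map_append, List.map_map, beq_self_eq_true, if_true]
        have e1 : t.map (fun p => if (p.1 == k) = true then (k, j') else p) = t := by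
          conv_rhs => rw [← List.map_id t]
          apply List.map_congr_left
          intro p hp
          have : p.1 ≠ k := fun h => ht p hp (h ▸ List.mem_cons_self ..)
          simp [this]
        have e2 : L.map ((fun p => if (p.1 == k) = true then (k, j') else p) ∘ fun k => (k, j))
            = L.map (fun k => (k, j)) := by
          apply List.map_congr_left
          intro a ha
          have : a ≠ k := fun h => (List.nodup_cons.mp hL).1 (h ▸ ha)
          simp [this]
        rw [e1, e2]
        simp
      rw [hstep, ih (List.nodup_cons.mp hL).2 (t := t ++ [(k, j')])]
      · simp
      · intro p hp
        rcases List.mem_append.mp hp with h | h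
        · exact fun hm => ht p h (List.mem_cons_of_mem _ hm)
        · simp only [List.mem_singleton] at h
          intro hm
          rw [h] at hm
          exact (List.nodup_cons.mp hL).1 hm

-- constant-value block loop after the first pass: every later pass only overwrites
lemma foldl_block (B : List (String × Int)) (n0 : Int) (L : List String)
    (t : List (String × Int)) (j0 : Int)
    (hL : L.Nodup) (ht : ∀ p ∈ t, p.1 ∉ L) :
    (PySem.List.enumerate B n0).foldl (fun r p => L.foldl (fun r k => r.insert k p.1) r)
        (PySem.Dict.mk (t ++ L.map (fun k => (k, j0))))
      = PySem.Dict.mk (t ++ L.map (fun k => (k, (PySem.List.enumerate B n0).foldl (fun _ p => p.1) j0))) := by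
  induction B generalizing n0 j0 with
  | nil => rfl
  | cons b B ih =>
      simp only [PySem.List.enumerate_cons, List.foldl_cons]
      rw [foldl_insert_overwrite L t j0 n0 hL ht, ih (n0 + 1) n0]

-- sorted-prefix split at the minimal value
lemma split_min (S : List (String × Int)) (v0 : Int)
    (hp : S.Pairwise (fun a b => a.2 ≤ b.2)) (hmin : ∀ kv ∈ S, v0 ≤ kv.2) :
    S = S.filter (fun kv => kv.2 == v0) ++ S.filter (fun kv => !(kv.2 == v0)) := by
  induction S with
  | nil => rfl
  | cons x S ih =>
      rcases List.pairwise_cons.mp hp with ⟨hx, hp'⟩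
      by_cases hv : x.2 = v0
      · simp only [List.filter_cons, hv, beq_self_eq_true, if_true, Bool.not_true]
        simpa using ih hp' (fun kv hk => hmin kv (List.mem_cons_of_mem _ hk))
      · have hgt : v0 < x.2 := lt_of_le_of_ne (hmin x (by simp)) (Ne.symm hv)
        have h1 : S.filter (fun kv => kv.2 == v0) = [] := by
          simp only [List.filter_eq_nil_iff]
          intro kv hk
          have := hx kv hk
          simp only [beq_iff_eq]
          omega
        have h2 : S.filter (fun kv => !(kv.2 == v0)) = S := by
          apply List.filter_eq_self.mpr
          intro kv hk
          have h3 := hx kv hk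
          have : kv.2 ≠ v0 := by omega
          simp [this]
        simp [hv, h1, h2]

-- last index produced by an unconditional index fold
lemma last_index (T : List (String × Int)) (m j0 : Int) (h : T ≠ []) :
    (PySem.List.enumerate T m).foldl (fun _ p => p.1) j0 = m + T.length - 1 := by
  induction T generalizing m j0 with
  | nil => exact absurd rfl h
  | cons x T ih =>
      simp only [PySem.List.enumerate_cons, List.foldl_cons]
      rcases eq_or_ne T [] with rfl | hT
      · simp [PySem.List.enumerate_nil]
      · rw [ih (m + 1) m hT]
        simp only [List.length_cons]
        push_cast
        ring

-- one whole constant-value block: first pass appends the fresh keys, later passes overwrite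
lemma block_full (B : List (String × Int)) (n0 : Int) (L : List String)
    (r : PySem.Dict String Int)
    (hB : B ≠ []) (hL : L.Nodup) (hr : ∀ k ∈ L, r.contains k = false) :
    (PySem.List.enumerate B n0).foldl (fun r p => L.foldl (fun r k => r.insert k p.1) r) r
      = PySem.Dict.mk (r.items ++ L.map (fun k => (k, n0 + B.length - 1))) := by
  obtain ⟨b, B', rfl⟩ := List.exists_cons_of_ne_nil hB
  rw [PySem.List.enumerate_cons, List.foldl_cons]
  have hdisj : ∀ p ∈ r.items, p.1 ∉ L := by
    intro p hp hmem
    have h1 : r.contains p.1 = true :=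
      (PySem.Dict.contains_iff_mem_keys r p.1).mpr (PySem.Dict.mem_keys_of_mem_items r hp)
    rw [hr p.1 hmem] at h1
    exact Bool.false_ne_true h1
  have h1 : L.foldl (fun r k => r.insert k n0) r
      = PySem.Dict.mk (r.items ++ L.map (fun k => (k, n0))) := by
    apply PySem.Dict.ext
    have := PySem.Dict.items_foldl_insert_fresh L (fun a => a) (fun _ => n0) r hr (by simpa using hL)
    simpa using this
  rw [h1, foldl_block B' (n0 + 1) L r.items n0 hL hdisj]
  have hmapc : ∀ (c c' : Int), c = c' →
      L.map (fun k => (k, c)) = L.map (fun k => (k, c')) := fun c c' h => by rw [h]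
  rcases eq_or_ne B' [] with rfl | hB'
  · rw [PySem.List.enumerate_nil, List.foldl_nil,
        hmapc _ _ (show n0 = n0 + ↑([b].length) - 1 by simp)]
  · rw [last_index B' (n0 + 1) n0 hB',
        hmapc _ _ (show n0 + 1 + (B'.length : Int) - 1 = n0 + ↑((b :: B').length) - 1 by
          simp only [List.length_cons]; push_cast; ring)]

-- MAIN: A's double loop, over any sorted stable segment S, appends exactly the ranked items
lemma main_loop (n : Nat) : ∀ (S : List (String × Int)) (K : List String) (val : String → Int)
    (r : PySem.Dict String Int) (n0 : Int),
    S.length ≤ n →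
    (S.map (·.1)).Nodup →
    S.Pairwise (fun a b => a.2 ≤ b.2) →
    (∀ v, (∃ kv ∈ S, kv.2 = v) → (S.filter (fun kv => kv.2 == v)).map (·.1) = K.filter (fun k => val k == v)) →
    (∀ kv ∈ S, r.contains kv.1 = false) →
    (PySem.List.enumerate S n0).foldl
        (fun r p => K.foldl (fun r k => if val k = p.2.2 then r.insert k p.1 else r) r) r
      = PySem.Dict.mk (r.items ++ S.map (fun kv => (kv.1, pvRank S n0 kv.2 0))) := by
  induction n with
  | zero =>
      intro S K val r n0 hlen _ _ _ _
      have : S = [] := List.eq_nil_of_length_eq_zero (Nat.le_zero.mp hlen)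
      subst this
      simp only [PySem.List.enumerate_nil, List.foldl_nil, List.map_nil, List.append_nil]
  | succ n ih =>
      intro S K val r n0 hlen hnd hp h2 hfresh
      rcases S with _ | ⟨s, S'⟩
      · simp only [PySem.List.enumerate_nil, List.foldl_nil, List.map_nil, List.append_nil]
      set v0 := s.2 with hv0
      have hmin : ∀ kv ∈ s :: S', v0 ≤ kv.2 := by
        intro kv hk
        rcases List.mem_cons.mp hk with rfl | hk'
        · exact le_refl _
        · exact (List.pairwise_cons.mp hp).1 kv hk'
      set B := (s :: S').filter (fun kv => kv.2 == v0) with hB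
      set S2 := (s :: S').filter (fun kv => !(kv.2 == v0)) with hS2
      have hsplit : s :: S' = B ++ S2 := split_min (s :: S') v0 hp hmin
      set L := B.map (·.1) with hLdef
      have hsB : s ∈ B := by
        rw [hB]; exact List.mem_filter.mpr ⟨List.mem_cons_self .., by simp [hv0]⟩
      have hBne : B ≠ [] := List.ne_nil_of_mem hsB
      have hBv : ∀ kv ∈ B, kv.2 = v0 := by
        intro kv hk
        rw [hB] at hk
        simpa using (List.mem_filter.mp hk).2
      have hS2v : ∀ kv ∈ S2, kv.2 ≠ v0 := by
        intro kv hk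
        rw [hS2] at hk
        simpa using (List.mem_filter.mp hk).2
      have hBsub : ∀ kv ∈ B, kv ∈ s :: S' := fun kv hk => by
        rw [hB] at hk; exact List.mem_of_mem_filter hk
      have hS2sub : ∀ kv ∈ S2, kv ∈ s :: S' := fun kv hk => by
        rw [hS2] at hk; exact List.mem_of_mem_filter hk
      have hndBS : ((B ++ S2).map (·.1)).Nodup := by rw [← hsplit]; exact hnd
      have hL : L.Nodup := by
        rw [hLdef]
        rw [List.map_append] at hndBS
        exact (List.nodup_append.mp hndBS).1
      have hKv0 : L = K.filter (fun k => val k == v0) := by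
        rw [hLdef, ← h2 v0 ⟨s, List.mem_cons_self .., rfl⟩, hB]
      have hlensum : (s :: S').length = B.length + S2.length := by
        rw [hsplit, List.length_append]
      have hS2len : S2.length ≤ n := by
        have h1 : 1 ≤ B.length := List.length_pos_of_mem hsB
        have h2 : (s :: S').length ≤ n + 1 := hlen
        omega
      -- rewrite the loop over the split
      rw [hsplit, PySem.List.enumerate_append, List.foldl_append]
      -- phase 1: the whole minimal block
      have hph1 : (PySem.List.enumerate B n0).foldl
          (fun r p => K.foldl (fun r k => if val k = p.2.2 then r.insert k p.1 else r) r) r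
          = (PySem.List.enumerate B n0).foldl (fun r p => L.foldl (fun r k => r.insert k p.1) r) r := by
        apply PySem.List.foldl_congr_mem
        intro acc p hp'
        obtain ⟨kidx, hki, hpe⟩ := (PySem.List.mem_enumerate_iff B n0 p).mp hp'
        have hp2 : p.2 ∈ B := by rw [hpe]; exact List.getElem_mem hki
        rw [hBv _ hp2, hKv0, List.foldl_filter]
        simp only [beq_iff_eq]
      have hfreshL : ∀ k ∈ L, r.contains k = false := by
        intro k hk
        rw [hLdef] at hk
        obtain ⟨kv, hkv, rfl⟩ := List.mem_map.mp hk
        exact hfresh kv (hBsub kv hkv)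
      rw [hph1, block_full B n0 L r hBne hL hfreshL]
      -- phase 2: the strictly larger rest, by the inductive hypothesis
      have hndS2 : (S2.map (·.1)).Nodup := by
        rw [List.map_append] at hndBS
        exact (List.nodup_append.mp hndBS).2.1
      have hdisjBS2 : ∀ a ∈ L, a ∉ S2.map (·.1) := by
        rw [List.map_append] at hndBS
        intro a ha hb
        exact List.disjoint_of_nodup_append hndBS ha hb
      have hpS2 : S2.Pairwise (fun a b => a.2 ≤ b.2) := by
        rw [hS2]; exact List.Pairwise.sublist List.filter_sublist hp
      have h2' : ∀ v, (∃ kv ∈ S2, kv.2 = v) →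
          (S2.filter (fun kv => kv.2 == v)).map (·.1) = K.filter (fun k => val k == v) := by
        rintro v ⟨kv, hkv, rfl⟩
        have hvne : kv.2 ≠ v0 := hS2v kv hkv
        have hBf : B.filter (fun a => a.2 == kv.2) = [] := by
          rw [List.filter_eq_nil_iff]
          intro a ha
          have := hBv a ha
          simp only [beq_iff_eq]
          omega
        have hface : (s :: S').filter (fun a => a.2 == kv.2)
            = S2.filter (fun a => a.2 == kv.2) := by
          rw [hsplit, List.filter_append, hBf, List.nil_append]
        rw [← hface]
        exact h2 kv.2 ⟨kv, by rw [hsplit]; exact List.mem_append_right _ hkv, rfl⟩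
      have hfresh2 : ∀ kv ∈ S2,
          (PySem.Dict.mk (r.items ++ L.map (fun k => (k, n0 + B.length - 1)))).contains kv.1 = false := by
        intro kv hkv
        rw [Bool.eq_false_iff]
        intro hc
        have hmem := (PySem.Dict.contains_iff_mem_keys _ _).mp hc
        have hkeys : (PySem.Dict.mk (r.items ++ L.map (fun k => (k, n0 + B.length - 1)))).keys
            = r.items.map (·.1) ++ L := by
          simp [PySem.Dict.keys, List.map_map, Function.comp_def]
        rw [hkeys] at hmem
        rcases List.mem_append.mp hmem with h | h
        · have : r.contains kv.1 = true :=
            (PySem.Dict.contains_iff_mem_keys r kv.1).mpr (by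
              simpa [PySem.Dict.keys] using h)
          rw [hfresh kv (hS2sub kv hkv)] at this
          exact Bool.false_ne_true this
        · exact hdisjBS2 kv.1 h (List.mem_map_of_mem hkv)
      rw [ih S2 K val _ (n0 + ↑B.length) hS2len hndS2 hpS2 h2' hfresh2]
      -- assemble both sides
      apply PySem.Dict.ext
      simp only [List.map_append]
      have eB : B.map (fun kv => (kv.1, pvRank (B ++ S2) n0 kv.2 0))
          = L.map (fun k => (k, n0 + B.length - 1)) := by
        rw [hLdef, List.map_map]
        apply List.map_congr_left
        intro kv hkv
        have h1 : pvRank B n0 kv.2 0 = n0 + B.length - 1 :=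
          pvRank_of_all_eq B n0 kv.2 0 hBne (by
            intro a ha
            rw [hBv a ha, hBv kv hkv])
        have h2 : pvRank S2 (n0 + B.length) kv.2 (n0 + B.length - 1) = n0 + B.length - 1 :=
          pvRank_of_not_mem _ _ _ _ (by
            intro a ha hav
            exact hS2v a ha (by rw [hav, hBv kv hkv]))
        rw [pvRank_append, h1, h2]
        rfl
      have eS2 : S2.map (fun kv => (kv.1, pvRank (B ++ S2) n0 kv.2 0))
          = S2.map (fun kv => (kv.1, pvRank S2 (n0 + B.length) kv.2 0)) := by
        apply List.map_congr_left
        intro kv hkv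
        have h1 : pvRank B n0 kv.2 0 = 0 :=
          pvRank_of_not_mem _ _ _ _ (by
            intro a ha hav
            exact hS2v kv hkv (by rw [← hav, hBv a ha]))
        rw [pvRank_append, h1]
      rw [eB, eS2]
      simp [List.append_assoc]

-- the two ports compute the same list
lemma ports_eq (dic : List (String × Int)) :
    sorted_dictionary dic = sorted_dictionary_alt dic := by
  unfold sorted_dictionary sorted_dictionary_alt
  dsimp only
  set d := PySem.Dict.ofList dic with hd
  set S := PySem.List.sorted d.items (fun x => x.2) with hS
  set last := (PySem.List.enumerate S).foldl (fun m p => m.insert p.2.2 p.1)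
      (PySem.Dict.empty : PySem.Dict Int Int) with hlastdef
  have hkeys : d.keys = d.items.map (·.1) := rfl
  have hndk : d.keys.Nodup := by rw [hd]; exact PySem.Dict.nodup_keys_ofList dic
  have hnd : (S.map (·.1)).Nodup := by
    have h1 : (S.map (·.1)).Perm (d.items.map (·.1)) :=
      (PySem.List.sorted_perm d.items (fun x => x.2) false).map _
    exact (List.Perm.nodup_iff h1).mpr (by rw [← hkeys]; exact hndk)
  have hpair : S.Pairwise (fun a b => a.2 ≤ b.2) := by
    have := PySem.List.sorted_pairwise d.items (fun x => x.2)
    simpa [← hS] using this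
  have h2 : ∀ v, (∃ kv ∈ S, kv.2 = v) →
      (S.filter (fun kv => kv.2 == v)).map (·.1)
        = d.keys.filter (fun k => d.getD k 0 == v) := by
    intro v _
    have ha : S.filter (fun kv => kv.2 == v) = d.items.filter (fun kv => kv.2 == v) :=
      filter_sorted_eq d.items (fun x => x.2) v
    have hb : d.items.filter (fun kv => kv.2 == v)
        = (d.keys.filter (fun k => d.getD k 0 == v)).map (fun k => (k, d.getD k 0)) := by
      conv_lhs => rw [PySem.Dict.items_eq_map_keys d hndk 0]
      exact List.filter_map
    rw [ha, hb, List.map_map]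
    conv_rhs => rw [← List.map_id (d.keys.filter (fun k => d.getD k 0 == v))]
    apply List.map_congr_left
    intro a _
    rfl
  have hfreshE : ∀ kv ∈ S, (PySem.Dict.empty : PySem.Dict String Int).contains kv.1 = false :=
    fun kv _ => PySem.Dict.contains_empty kv.1
  have hA := main_loop S.length S d.keys (fun k => d.getD k 0) PySem.Dict.empty 0
    le_rfl hnd hpair h2 hfreshE
  have hconv : (PySem.List.pyRange 0 (PySem.List.len S)).foldl
      (fun r i => d.keys.foldl
        (fun r letter => if d.getD letter 0 = (PySem.List.pyGetD S i ("", 0)).2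
          then r.insert letter i else r) r) PySem.Dict.empty
      = (PySem.List.enumerate S).foldl
        (fun r p => d.keys.foldl
          (fun r k => if d.getD k 0 = p.2.2 then r.insert k p.1 else r) r) PySem.Dict.empty := by
    rw [PySem.List.enumerate_eq_map_pyRange S ("", 0), List.foldl_map]
  have hlast : ∀ v : Int, last.getD v 0 = pvRank S 0 v 0 := by
    intro v
    rw [hlastdef, getD_foldl_insert_snd, PySem.Dict.getD_empty]
  have hres : (S.foldl (fun r kv => r.insert kv.1 (last.getD kv.2 0)) PySem.Dict.empty).items
      = S.map (fun kv => (kv.1, last.getD kv.2 0)) := by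
    have := PySem.Dict.items_foldl_insert_fresh S (·.1) (fun kv => last.getD kv.2 0)
      PySem.Dict.empty (fun a _ => PySem.Dict.contains_empty a.1) hnd
    simpa using this
  rw [hconv, hA, hres]
  apply List.map_congr_left
  intro kv _
  rw [hlast]

-- ===== VERDICT (by name: the statement is the Claim_ definition above) =====
theorem sorted_dictionary_spec : Claim_equal_sorted_dictionary := by
  intro dic _
  unfold Spec_sorted_dictionary
  exact ports_eq dic
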